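-- pv_equiv track=rewrite | github.com/artcomp/avaliageo | info_extract.py | putIndexInToponyms
-- ===== SOURCE A (Python) =====
-- def putIndexInToponyms(text):
-- 	spl  = text.split("<button")
-- 	index_top = 0
-- 	for i in range(len(spl) - 1):
-- 		aux = 0
-- 		if aux % 2 == 0:
-- 			spl[i] = spl[i] + '<button id="toponym_in_news_' +str(index_top)+'"'
-- 			index_top = index_top + 1
-- 		aux = aux + 1
--
-- 	return ''.join(spl)
-- ===== SOURCE B (Python) =====
-- def putIndexInToponyms(text):
--     out = []
--     i = 0
--     n = 0
--     while i < len(text):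
--         if text.startswith('<button', i):
--             out.append('<button id="toponym_in_news_' + str(n) + '"')
--             n += 1
--             i += 7
--         else:
--             out.append(text[i])
--             i += 1
--     return ''.join(out)
-- ===== Notes on version B (the rewrite author's own statement) =====
-- stated objective: simpler
-- what changed: B replaces A's split-then-mutate-a-list-of-segments-in-a-range-loop-then-join pipeline with a single left-to-right scan that emits the indexed replacement in place at each occurrence of the button tag.
import Mathlib
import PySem

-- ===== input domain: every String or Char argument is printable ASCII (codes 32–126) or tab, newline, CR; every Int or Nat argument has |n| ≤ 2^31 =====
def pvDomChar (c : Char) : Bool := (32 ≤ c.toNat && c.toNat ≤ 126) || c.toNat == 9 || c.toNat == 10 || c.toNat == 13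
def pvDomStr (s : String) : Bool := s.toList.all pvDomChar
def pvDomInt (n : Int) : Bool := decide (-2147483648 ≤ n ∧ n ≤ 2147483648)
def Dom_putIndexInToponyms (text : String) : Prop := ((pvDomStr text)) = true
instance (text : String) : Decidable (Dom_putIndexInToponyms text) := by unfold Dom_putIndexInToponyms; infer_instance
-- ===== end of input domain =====

-- B replaces A's split/mutate-a-list/join with a single left-to-right scan that
-- substitutes each '<button' occurrence in place (objective: simpler one-pass code).

-- the separator '<button' and the id marker '<button id="toponym_in_news_N"'
def pvSep : List Char := "<button".toList
def pvMarker (n : Int) : List Char :=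
  "<button id=\"toponym_in_news_".toList ++ PySem.Int.toChars n ++ "\"".toList

-- ===== PORT A =====
-- spl[i] indexing: i comes from range(len(spl)-1), so it is a valid non-negative
-- index; List.getD/List.set at i.toNat are exact there.
def putIndexInToponyms (text : String) : String :=
  let spl := PySem.Chars.splitOn text.toList pvSep
  let st :=
    (PySem.List.pyRange 0 ((spl.length : Int) - 1)).foldl
      (fun (st : List (List Char) × Int) i =>
        let aux : Int := 0
        if PySem.Int.mod aux 2 = 0 then
          (st.1.set i.toNat ((st.1.getD i.toNat []) ++ pvMarker st.2), st.2 + 1)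
        else (st.1, st.2))
      (spl, 0)
  String.ofList (PySem.Chars.join [] st.1)

-- ===== PORT B =====
-- the while loop of Source B: one scan over the characters; 'text.startswith("<button", i)'
-- is pvSep.isPrefixOf the remaining characters, 'i += 7' is dropping 7 characters.
def putIndexInToponymsScanB (cs : List Char) (n : Int) : List Char :=
  match cs with
  | [] => []
  | c :: rest =>
    if PySem.Chars.startswith (c :: rest) pvSep then
      pvMarker n ++ putIndexInToponymsScanB ((c :: rest).drop 7) (n + 1)
    else
      c :: putIndexInToponymsScanB rest n
termination_by cs.length
decreasing_by
  · simp
  · simp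

def putIndexInToponyms_alt (text : String) : String :=
  String.ofList (putIndexInToponymsScanB text.toList 0)

-- ===== PRECONDITION & SPEC =====
def Spec_putIndexInToponyms (text : String) (out : String) : Prop := out = putIndexInToponyms_alt text
instance (text : String) (out : String) : Decidable (Spec_putIndexInToponyms text out) := by unfold Spec_putIndexInToponyms; infer_instance

-- ===== CLAIM (what is proved, stated in full; the proofs are below) =====
def Claim_equal_putIndexInToponyms : Prop := ∀ (text : String), Dom_putIndexInToponyms text → Spec_putIndexInToponyms text (putIndexInToponyms text)

-- ===== LEMMAS AND PROOFS =====

theorem pvModifyHead_triv {α : Type} (l : List α) : List.modifyHead (fun x => x) l = l := by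
  cases l <;> rfl

-- pure recursive characterisation of splitOn at separator pvSep
def pvPieces (l : List Char) : List (List Char) :=
  match l with
  | [] => [[]]
  | c :: rest =>
    if pvSep.isPrefixOf (c :: rest) then
      [] :: pvPieces ((c :: rest).drop pvSep.length)
    else
      (pvPieces rest).modifyHead (c :: ·)
termination_by l.length
decreasing_by
  · simp [pvSep]
  · simp

-- the intended result: pieces joined with markers n, n+1, … between them
def pvJoinM (ps : List (List Char)) (n : Int) : List Char :=
  match ps with
  | [] => []
  | [x] => x
  | x :: y :: rest => x ++ pvMarker n ++ pvJoinM (y :: rest) (n + 1)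

theorem pvPieces_ne_nil (l : List Char) : pvPieces l ≠ [] := by
  match l with
  | [] => simp [pvPieces]
  | c :: rest =>
    rw [pvPieces]
    split
    · simp
    · cases h : pvPieces rest with
      | nil => exact absurd h (pvPieces_ne_nil rest)
      | cons a as => simp

theorem pvSplitOn_go_eq (fuel : Nat) (l cur : List Char) (acc : List (List Char))
    (h : l.length < fuel) :
    PySem.Chars.splitOn.go pvSep fuel l cur acc
      = acc.reverse ++ (pvPieces l).modifyHead (cur.reverse ++ ·) := by
  induction fuel generalizing l cur acc with
  | zero => omega
  | succ fuel ih =>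
    match l with
    | [] =>
      simp [PySem.Chars.splitOn.go, pvPieces]
    | c :: rest =>
      rw [PySem.Chars.splitOn.go]
      by_cases hp : pvSep.isPrefixOf (c :: rest)
      · rw [if_pos hp]
        have hd : (List.drop pvSep.length (c :: rest)).length < fuel := by
          simp [pvSep] at h ⊢; omega
        rw [ih _ _ _ hd]
        simp [pvPieces, hp, pvModifyHead_triv]
      · rw [if_neg hp]
        rw [ih _ _ _ (by simpa using h)]
        simp only [pvPieces, if_neg hp, List.modifyHead_modifyHead]
        congr 2
        funext x
        simp

theorem pvSplitOn_eq_pieces (l : List Char) :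
    PySem.Chars.splitOn l pvSep = pvPieces l := by
  have := pvSplitOn_go_eq (l.length + 1) l [] [] (by omega)
  simpa [PySem.Chars.splitOn, pvModifyHead_triv] using this

-- B's scan produces exactly the pieces joined with markers
theorem pvScanB_eq_joinM (l : List Char) (n : Int) :
    putIndexInToponymsScanB l n = pvJoinM (pvPieces l) n := by
  match l with
  | [] => simp [putIndexInToponymsScanB, pvPieces, pvJoinM]
  | c :: rest =>
    rw [putIndexInToponymsScanB, pvPieces]
    by_cases hp : pvSep.isPrefixOf (c :: rest)
    · rw [if_pos (by simpa [PySem.Chars.startswith] using hp), if_pos hp]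
      have hlen : pvSep.length = 7 := by decide
      rw [hlen]
      rw [pvScanB_eq_joinM ((c :: rest).drop 7) (n + 1)]
      cases h : pvPieces ((c :: rest).drop 7) with
      | nil => exact absurd h (pvPieces_ne_nil _)
      | cons a as => simp [pvJoinM]
    · rw [if_neg (by simpa [PySem.Chars.startswith] using hp), if_neg hp]
      rw [pvScanB_eq_joinM rest n]
      cases h : pvPieces rest with
      | nil => exact absurd h (pvPieces_ne_nil _)
      | cons a as =>
        cases as with
        | nil => simp [pvJoinM]
        | cons b bs => simp [pvJoinM]
termination_by l.length
decreasing_by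
  · simp
  · simp

-- the loop body of A's port, with the always-true 'aux % 2 == 0' branch taken
def pvStep (st : List (List Char) × Int) (i : Nat) : List (List Char) × Int :=
  (st.1.set i ((st.1.getD i []) ++ pvMarker st.2), st.2 + 1)

theorem pvStep_shift (is : List Nat) (y : List Char) (ys : List (List Char)) (d : Int) :
    is.foldl (fun st i => pvStep st (i + 1)) (y :: ys, d)
      = (y :: (is.foldl pvStep (ys, d)).1, (is.foldl pvStep (ys, d)).2) := by
  induction is generalizing ys d with
  | nil => simp
  | cons i is ih =>
    simp only [List.foldl_cons]
    rw [show pvStep (y :: ys, d) (i + 1) = (y :: (pvStep (ys, d) i).1, (pvStep (ys, d) i).2)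
        from by simp [pvStep]]
    exact ih _ _

-- all but the last piece get their marker appended, counting from c
def pvMarkL (ps : List (List Char)) (c : Int) : List (List Char) :=
  match ps with
  | [] => []
  | [x] => [x]
  | x :: y :: rest => (x ++ pvMarker c) :: pvMarkL (y :: rest) (c + 1)

theorem pvFold_eq_markL (ps : List (List Char)) (c : Int) :
    ((List.range (ps.length - 1)).foldl pvStep (ps, c)).1 = pvMarkL ps c := by
  induction ps generalizing c with
  | nil => simp [pvMarkL]
  | cons x xs ih =>
    cases xs with
    | nil => simp [pvMarkL]
    | cons y ys =>
      have hr : (x :: y :: ys).length - 1 = (y :: ys).length := by simp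
      rw [hr, show (y :: ys).length = ys.length + 1 from by simp, List.range_succ_eq_map]
      simp only [List.foldl_cons, List.foldl_map]
      rw [show pvStep (x :: y :: ys, c) 0 = ((x ++ pvMarker c) :: y :: ys, c + 1) from by
        simp [pvStep]]
      rw [pvStep_shift]
      have := ih (c + 1)
      rw [show (y :: ys).length - 1 = ys.length from by simp] at this
      rw [this]
      simp [pvMarkL]

theorem pvJoin_markL (ps : List (List Char)) (c : Int) :
    PySem.Chars.join [] (pvMarkL ps c) = pvJoinM ps c := by
  match ps with
  | [] => simp [pvMarkL, pvJoinM, PySem.Chars.join_nil]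
  | [x] => simp [pvMarkL, pvJoinM, PySem.Chars.join_singleton]
  | x :: y :: rest =>
    rw [pvMarkL, pvJoinM]
    cases h : pvMarkL (y :: rest) (c + 1) with
    | nil => cases rest <;> simp [pvMarkL] at h
    | cons a as =>
      rw [PySem.Chars.join_cons_cons]
      rw [← h, pvJoin_markL (y :: rest) (c + 1)]
      simp

-- ===== VERDICT (by name: the statement is the Claim_ definition above) =====
theorem putIndexInToponyms_spec : Claim_equal_putIndexInToponyms := by
  intro text _
  show putIndexInToponyms text = putIndexInToponyms_alt text
  simp only [putIndexInToponyms, putIndexInToponyms_alt]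
  rw [pvSplitOn_eq_pieces, pvScanB_eq_joinM]
  congr 1
  have hlen : ((pvPieces text.toList).length : Int) - 1
      = ((pvPieces text.toList).length - 1 : Nat) := by
    have := pvPieces_ne_nil text.toList
    have : 0 < (pvPieces text.toList).length := List.length_pos_of_ne_nil this
    omega
  rw [hlen, PySem.List.pyRange_zero_natCast]
  simp only [List.foldl_map]
  have hbody : ∀ (st : List (List Char) × Int) (k : Nat),
      (if PySem.Int.mod 0 2 = 0 then
        (st.1.set (k : Int).toNat ((st.1.getD (k : Int).toNat []) ++ pvMarker st.2), st.2 + 1)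
      else (st.1, st.2)) = pvStep st k := by
    intro st k
    rw [if_pos (by decide)]
    simp [pvStep]
  simp only [hbody]
  rw [pvFold_eq_markL, pvJoin_markL]
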